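-- pv_equiv track=rewrite | github.com/aadim14/AI-ML-projects | crossword_word_filling.py | compute_cell_letter_options
-- ===== SOURCE A (Python) =====
-- def compute_cell_letter_options(b, H, W, HR, VR, HP, VP, cm):
--     d = {}
--     n = H * W
--     for i in range(n):
--         if b[i] == '#':
--             continue
--         r, c = divmod(i, W)
--         if (r, c) not in cm:
--             continue
--         if b[i] not in ('-', '#'):
--             d[(r, c)] = {b[i].upper()}
--         else:
--             L = []
--             for (rt, idx, off) in cm[(r, c)]:
--                 if rt == 'H' and idx < len(HP):
--                     cw = HP[idx]
--                 elif rt == 'V' and idx < len(VP):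
--                     cw = VP[idx]
--                 else:
--                     cw = set()
--                 vals = set()
--                 for w2 in cw:
--                     vals.add(w2[off])
--                 L.append(vals)
--             if not L:
--                 d[(r, c)] = set()
--             else:
--                 S = L[0]
--                 for S2 in L[1:]:
--                     S = S.intersection(S2)
--                 d[(r, c)] = S
--     return d
-- ===== SOURCE B (Python) =====
-- def compute_cell_letter_options(b, H, W, HR, VR, HP, VP, cm):
--     n = H * W
--     # pass 1: letters available for each requested (slot-type, slot-index, offset),
--     # computed once per distinct triple instead of once per occurrence
--     table = {}
--     for i in range(n):
--         if b[i] == '-':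
--             for t in cm.get(divmod(i, W), ()):
--                 if t not in table:
--                     rt, idx, off = t
--                     if rt == 'H' and idx < len(HP):
--                         words = HP[idx]
--                     elif rt == 'V' and idx < len(VP):
--                         words = VP[idx]
--                     else:
--                         words = []
--                     table[t] = {w[off] for w in words}
--     # pass 2: emit per-cell options by table lookup only
--     out = {}
--     for i in range(n):
--         cell = b[i]
--         if cell == '#':
--             continue
--         rc = divmod(i, W)
--         if rc not in cm:
--             continue
--         if cell != '-':
--             out[rc] = {cell.upper()}
--         else:
--             sets = [table[t] for t in cm[rc]]
--             out[rc] = {x for x in sets[0] if all(x in s for s in sets[1:])} if sets else set()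
--     return out
-- ===== Notes on version B (the rewrite author's own statement) =====
-- stated objective: alternative
-- what changed: B splits the work into two passes: a first pass computes each requested (slot-type, index, offset) letter set exactly once per distinct triple into a table, and a second pass emits per-cell options by table lookup only, intersecting via a single membership filter instead of A's per-cell recomputation and iterated pairwise set intersections.
import Mathlib
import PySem

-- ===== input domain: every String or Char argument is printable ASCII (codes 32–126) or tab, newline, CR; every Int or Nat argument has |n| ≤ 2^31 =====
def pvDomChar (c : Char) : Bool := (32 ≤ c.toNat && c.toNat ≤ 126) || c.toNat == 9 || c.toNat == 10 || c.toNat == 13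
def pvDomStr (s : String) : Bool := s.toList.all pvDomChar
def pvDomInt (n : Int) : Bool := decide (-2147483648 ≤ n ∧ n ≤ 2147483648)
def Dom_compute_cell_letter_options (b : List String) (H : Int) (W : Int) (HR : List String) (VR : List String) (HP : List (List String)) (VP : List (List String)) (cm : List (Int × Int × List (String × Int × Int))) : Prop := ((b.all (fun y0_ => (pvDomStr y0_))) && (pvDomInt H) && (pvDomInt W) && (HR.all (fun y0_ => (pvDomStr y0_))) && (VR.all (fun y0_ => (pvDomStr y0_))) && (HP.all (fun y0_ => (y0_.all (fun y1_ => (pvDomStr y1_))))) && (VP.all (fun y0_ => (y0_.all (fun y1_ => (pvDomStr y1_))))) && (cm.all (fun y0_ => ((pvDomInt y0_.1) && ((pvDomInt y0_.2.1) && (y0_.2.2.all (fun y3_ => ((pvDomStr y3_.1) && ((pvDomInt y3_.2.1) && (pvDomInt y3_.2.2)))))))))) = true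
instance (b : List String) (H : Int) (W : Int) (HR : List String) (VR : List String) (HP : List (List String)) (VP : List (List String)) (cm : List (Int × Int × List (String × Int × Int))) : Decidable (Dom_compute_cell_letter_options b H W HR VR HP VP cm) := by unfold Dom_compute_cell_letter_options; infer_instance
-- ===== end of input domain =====

-- B replaces A's per-cell recomputation of each slot's letter sets by a first pass that
-- computes the letter set once per distinct requested (slot-type, index, offset) triple,
-- and a second pass that only looks them up (objective: alternative decomposition).

-- ===== PORT A =====
-- w2[off] on a Python string (1-char string result); total form, exact under Pre_ (off in range)
def pvCharAt (w : String) (off : Int) : String :=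
  match PySem.Str.pyGet? w off with
  | some ch => String.ofList [ch]
  | none => ""

def compute_cell_letter_options (b : List String) (H : Int) (W : Int) (HR : List String) (VR : List String) (HP : List (List String)) (VP : List (List String)) (cm : List (Int × Int × List (String × Int × Int))) : List (Int × Int × List String) :=
  let cmd : PySem.Dict (Int × Int) (List (String × Int × Int)) :=
    PySem.Dict.mk (cm.map (fun e => ((e.1, e.2.1), e.2.2)))
  let n := H * W
  let d := (PySem.List.pyRange 0 n 1).foldl (fun (d : PySem.Dict (Int × Int) (List String)) i =>
    let cell := PySem.List.pyGetD b i ""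
    if cell == "#" then d
    else
      let r := PySem.Int.floordiv i W
      let c := PySem.Int.mod i W
      match PySem.Dict.get? cmd (r, c) with
      | none => d
      | some slots =>
        if !(cell == "-" || cell == "#") then
          PySem.Dict.insert d (r, c) (PySem.Set.ofList [PySem.Str.upper cell])
        else
          let L := slots.foldl (fun (L : List (PySem.Set String)) e =>
            let cw : List String :=
              if e.1 == "H" && decide (e.2.1 < (HP.length : Int)) then PySem.List.pyGetD HP e.2.1 []
              else if e.1 == "V" && decide (e.2.1 < (VP.length : Int)) then PySem.List.pyGetD VP e.2.1 []
              else []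
            let vals := cw.foldl (fun (s : PySem.Set String) w2 =>
              PySem.Set.add s (pvCharAt w2 e.2.2)) PySem.Set.empty
            L ++ [vals]) []
          match L with
          | [] => PySem.Dict.insert d (r, c) PySem.Set.empty
          | S0 :: rest =>
            PySem.Dict.insert d (r, c) (rest.foldl (fun S S2 => PySem.Set.inter S S2) S0))
    PySem.Dict.empty
  (PySem.Dict.items d).map (fun kv => (kv.1.1, kv.1.2, kv.2))

-- ===== PORT B =====
-- the letter set of one requested (slot-type, index, offset) triple (B's pass-1 helper)
def pvLettersB (HP VP : List (List String)) (e : String × Int × Int) : PySem.Set String :=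
  let words : List String :=
    if e.1 == "H" && decide (e.2.1 < (HP.length : Int)) then PySem.List.pyGetD HP e.2.1 []
    else if e.1 == "V" && decide (e.2.1 < (VP.length : Int)) then PySem.List.pyGetD VP e.2.1 []
    else []
  PySem.Set.ofList (words.map (fun w =>
    match PySem.Str.pyGet? w e.2.2 with
    | some ch => String.ofList [ch]
    | none => ""))

def compute_cell_letter_options_alt (b : List String) (H : Int) (W : Int) (HR : List String) (VR : List String) (HP : List (List String)) (VP : List (List String)) (cm : List (Int × Int × List (String × Int × Int))) : List (Int × Int × List String) :=
  let cmd : PySem.Dict (Int × Int) (List (String × Int × Int)) :=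
    PySem.Dict.mk (cm.map (fun e => ((e.1, e.2.1), e.2.2)))
  let n := H * W
  -- pass 1: one letter set per distinct requested triple
  let table := (PySem.List.pyRange 0 n 1).foldl
    (fun (tb : PySem.Dict (String × Int × Int) (List String)) i =>
      if PySem.List.pyGetD b i "" == "-" then
        (PySem.Dict.getD cmd (PySem.Int.floordiv i W, PySem.Int.mod i W) []).foldl
          (fun tb e =>
            if PySem.Dict.contains tb e then tb
            else PySem.Dict.insert tb e (pvLettersB HP VP e)) tb
      else tb)
    PySem.Dict.empty
  -- pass 2: per-cell output by lookup only (table[t] in Source B; the none branch is unreachable)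
  let out := (PySem.List.pyRange 0 n 1).foldl
    (fun (out : PySem.Dict (Int × Int) (List String)) i =>
      let cell := PySem.List.pyGetD b i ""
      if cell == "#" then out
      else
        let rc := (PySem.Int.floordiv i W, PySem.Int.mod i W)
        match PySem.Dict.get? cmd rc with
        | none => out
        | some slots =>
          if !(cell == "-") then
            PySem.Dict.insert out rc (PySem.Set.ofList [PySem.Str.upper cell])
          else
            match slots.map (fun e => (PySem.Dict.get? table e).getD []) with
            | [] => PySem.Dict.insert out rc PySem.Set.empty
            | S0 :: rest =>
              PySem.Dict.insert out rc (S0.filter (fun x => rest.all (fun s => PySem.Set.contains s x))))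
    PySem.Dict.empty
  (PySem.Dict.items out).map (fun kv => (kv.1.1, kv.1.2, kv.2))

-- ===== PRECONDITION & SPEC =====
-- Pre_: exactly where Python A returns normally — the grid indices i < H*W stay inside b
-- (else b[i] is an IndexError) and, for every slot triple requested through a reachable
-- '-' cell, the slot index and every candidate word's offset are in range (else HP[idx]/
-- VP[idx]/w2[off] is an IndexError).
def pvSlotOK (HP VP : List (List String)) (e : String × Int × Int) : Prop :=
  (e.1 = "H" → e.2.1 < (HP.length : Int) →
    (-(HP.length : Int) ≤ e.2.1 ∧ ∀ w ∈ PySem.List.pyGetD HP e.2.1 [], PySem.Raise.InRange w.toList.length e.2.2)) ∧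
  (e.1 = "V" → e.2.1 < (VP.length : Int) →
    (-(VP.length : Int) ≤ e.2.1 ∧ ∀ w ∈ PySem.List.pyGetD VP e.2.1 [], PySem.Raise.InRange w.toList.length e.2.2))

def Pre_compute_cell_letter_options (b : List String) (H : Int) (W : Int) (HR : List String) (VR : List String) (HP : List (List String)) (VP : List (List String)) (cm : List (Int × Int × List (String × Int × Int))) : Prop :=
  (H * W ≤ (b.length : Int) ∨ H * W ≤ 0) ∧
  (∀ i ∈ PySem.List.pyRange 0 (H * W) 1,
    PySem.List.pyGetD b i "" = "-" →
    ∀ slots, PySem.Dict.get? (PySem.Dict.mk (cm.map (fun e => ((e.1, e.2.1), e.2.2))))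
        (PySem.Int.floordiv i W, PySem.Int.mod i W) = some slots →
    ∀ e ∈ slots, pvSlotOK HP VP e)

instance (b : List String) (H : Int) (W : Int) (HR : List String) (VR : List String) (HP : List (List String)) (VP : List (List String)) (cm : List (Int × Int × List (String × Int × Int))) : Decidable (Pre_compute_cell_letter_options b H W HR VR HP VP cm) := by
  unfold Pre_compute_cell_letter_options pvSlotOK; infer_instance

def pvWitness_compute_cell_letter_options : List String × Int × Int × List String × List String × List (List String) × List (List String) × (List (Int × Int × List (String × Int × Int))) :=
  (["A", "-"], 1, 2, [], [], [["AB"]], [], [(0, 0, []), (0, 1, [("H", 0, 0)])])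

def Spec_compute_cell_letter_options (b : List String) (H : Int) (W : Int) (HR : List String) (VR : List String) (HP : List (List String)) (VP : List (List String)) (cm : List (Int × Int × List (String × Int × Int))) (out : List (Int × Int × List String)) : Prop := out = compute_cell_letter_options_alt b H W HR VR HP VP cm
instance (b : List String) (H : Int) (W : Int) (HR : List String) (VR : List String) (HP : List (List String)) (VP : List (List String)) (cm : List (Int × Int × List (String × Int × Int))) (out : List (Int × Int × List String)) : Decidable (Spec_compute_cell_letter_options b H W HR VR HP VP cm out) := by unfold Spec_compute_cell_letter_options; infer_instance

-- ===== CLAIM (what is proved, stated in full; the proofs are below) =====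
def Claim_equal_compute_cell_letter_options : Prop := ∀ (b : List String) (H : Int) (W : Int) (HR : List String) (VR : List String) (HP : List (List String)) (VP : List (List String)) (cm : List (Int × Int × List (String × Int × Int))), Dom_compute_cell_letter_options b H W HR VR HP VP cm → Pre_compute_cell_letter_options b H W HR VR HP VP cm → Spec_compute_cell_letter_options b H W HR VR HP VP cm (compute_cell_letter_options b H W HR VR HP VP cm)

-- ===== LEMMAS AND PROOFS =====

-- table soundness/coverage for B's pass 1, and the per-cell value lemmas

-- the inner pass-1 step over one cell's slot list
theorem pv_tb_mono (HP VP : List (List String)) (l : List (String × Int × Int))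
    (tb : PySem.Dict (String × Int × Int) (List String)) (e : String × Int × Int) (v : List String)
    (h : tb.get? e = some v) :
    (l.foldl (fun tb e => if PySem.Dict.contains tb e then tb
      else PySem.Dict.insert tb e (pvLettersB HP VP e)) tb).get? e = some v := by
  induction l generalizing tb with
  | nil => simpa
  | cons x xs ih =>
    simp only [List.foldl_cons]
    apply ih
    by_cases hc : PySem.Dict.contains tb x
    · simpa [hc]
    · have hne : e ≠ x := by
        intro hex; subst hex
        rw [PySem.Dict.contains_eq_isSome_get?, h] at hc; simp at hc
      simp only [hc, if_false, Bool.false_eq_true]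
      rw [PySem.Dict.get?_insert_of_ne _ _ hne, h]

theorem pv_tb_sound (HP VP : List (List String)) (l : List (String × Int × Int))
    (tb : PySem.Dict (String × Int × Int) (List String))
    (hs : ∀ e v, tb.get? e = some v → v = pvLettersB HP VP e) :
    ∀ e v, (l.foldl (fun tb e => if PySem.Dict.contains tb e then tb
      else PySem.Dict.insert tb e (pvLettersB HP VP e)) tb).get? e = some v → v = pvLettersB HP VP e := by
  induction l generalizing tb with
  | nil => exact hs
  | cons x xs ih =>
    simp only [List.foldl_cons]
    apply ih
    by_cases hc : PySem.Dict.contains tb x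
    · simp only [hc, if_true]; exact hs
    · simp only [hc, if_false, Bool.false_eq_true]
      intro e v hv
      by_cases hex : e = x
      · subst hex; rw [PySem.Dict.get?_insert_self] at hv
        exact (Option.some_inj.mp hv).symm ▸ rfl
      · rw [PySem.Dict.get?_insert_of_ne _ _ hex] at hv
        exact hs e v hv

theorem pv_tb_covered (HP VP : List (List String)) (l : List (String × Int × Int))
    (tb : PySem.Dict (String × Int × Int) (List String))
    (hs : ∀ e v, tb.get? e = some v → v = pvLettersB HP VP e) :
    ∀ e ∈ l, (l.foldl (fun tb e => if PySem.Dict.contains tb e then tb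
      else PySem.Dict.insert tb e (pvLettersB HP VP e)) tb).get? e = some (pvLettersB HP VP e) := by
  induction l generalizing tb with
  | nil => simp
  | cons x xs ih =>
    intro e he
    simp only [List.foldl_cons]
    rcases List.mem_cons.mp he with hex | hexs
    · subst hex
      apply pv_tb_mono
      by_cases hc : PySem.Dict.contains tb e
      · rw [PySem.Dict.contains_eq_isSome_get?] at hc
        rcases Option.isSome_iff_exists.mp hc with ⟨v, hv⟩
        simp only [PySem.Dict.contains_eq_isSome_get?, hv, Option.isSome_some, if_true]
        rw [hs e v hv]
      · simp only [hc, if_false, Bool.false_eq_true]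
        exact PySem.Dict.get?_insert_self _ _ _
    · apply ih _ _ e hexs
      by_cases hc : PySem.Dict.contains tb x
      · simp only [hc, if_true]; exact hs
      · simp only [hc, if_false, Bool.false_eq_true]
        intro e' v hv
        by_cases hex : e' = x
        · subst hex; rw [PySem.Dict.get?_insert_self] at hv
          exact (Option.some_inj.mp hv).symm ▸ rfl
        · rw [PySem.Dict.get?_insert_of_ne _ _ hex] at hv
          exact hs e' v hv

-- the outer pass-1 fold over the cell indices
theorem pv_table_mono (b : List String) (W : Int) (HP VP : List (List String))
    (cmd : PySem.Dict (Int × Int) (List (String × Int × Int))) (l : List Int)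
    (tb : PySem.Dict (String × Int × Int) (List String)) (e : String × Int × Int) (v : List String)
    (h : tb.get? e = some v) :
    (l.foldl (fun tb i => if PySem.List.pyGetD b i "" == "-" then
        (PySem.Dict.getD cmd (PySem.Int.floordiv i W, PySem.Int.mod i W) []).foldl
          (fun tb e => if PySem.Dict.contains tb e then tb
            else PySem.Dict.insert tb e (pvLettersB HP VP e)) tb
      else tb) tb).get? e = some v := by
  induction l generalizing tb with
  | nil => simpa
  | cons j js ih =>
    simp only [List.foldl_cons]
    apply ih
    by_cases hc : PySem.List.pyGetD b j "" == "-"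
    · simp only [hc, if_true]; exact pv_tb_mono _ _ _ _ _ _ h
    · simpa [hc]

theorem pv_table_covered (b : List String) (W : Int) (HP VP : List (List String))
    (cmd : PySem.Dict (Int × Int) (List (String × Int × Int))) (l : List Int) :
    ∀ i ∈ l, PySem.List.pyGetD b i "" = "-" →
    ∀ e ∈ PySem.Dict.getD cmd (PySem.Int.floordiv i W, PySem.Int.mod i W) [],
    (l.foldl (fun tb i => if PySem.List.pyGetD b i "" == "-" then
        (PySem.Dict.getD cmd (PySem.Int.floordiv i W, PySem.Int.mod i W) []).foldl
          (fun tb e => if PySem.Dict.contains tb e then tb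
            else PySem.Dict.insert tb e (pvLettersB HP VP e)) tb
      else tb) PySem.Dict.empty).get? e = some (pvLettersB HP VP e) := by
  suffices hgen : ∀ (l : List Int) (tb : PySem.Dict (String × Int × Int) (List String)),
      (∀ e v, tb.get? e = some v → v = pvLettersB HP VP e) →
      ∀ i ∈ l, PySem.List.pyGetD b i "" = "-" →
      ∀ e ∈ PySem.Dict.getD cmd (PySem.Int.floordiv i W, PySem.Int.mod i W) [],
      (l.foldl (fun tb i => if PySem.List.pyGetD b i "" == "-" then
          (PySem.Dict.getD cmd (PySem.Int.floordiv i W, PySem.Int.mod i W) []).foldl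
            (fun tb e => if PySem.Dict.contains tb e then tb
              else PySem.Dict.insert tb e (pvLettersB HP VP e)) tb
        else tb) tb).get? e = some (pvLettersB HP VP e) by
    intro i hi hcond e he
    exact hgen l PySem.Dict.empty (by intro e v h; simp [PySem.Dict.empty, PySem.Dict.get?] at h) i hi hcond e he
  intro l
  induction l with
  | nil => intro tb _ i hi; simp at hi
  | cons j js ih =>
    intro tb hs i hi hcond e he
    simp only [List.foldl_cons]
    rcases List.mem_cons.mp hi with hij | hijs
    · subst hij
      have hc : (PySem.List.pyGetD b i "" == "-") = true := by simp [hcond]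
      simp only [hc, if_true]
      apply pv_table_mono
      exact pv_tb_covered HP VP _ tb hs e he
    · apply ih _ _ i hijs hcond e he
      by_cases hc : PySem.List.pyGetD b j "" == "-"
      · simp only [hc, if_true]; exact pv_tb_sound _ _ _ _ hs
      · simp only [hc, Bool.false_eq_true, if_false]; exact hs

-- A's iterated pairwise intersection equals B's single filter by membership in every later set
theorem pv_inter_filter (rest : List (PySem.Set String)) (S0 : PySem.Set String) :
    rest.foldl (fun S S2 => PySem.Set.inter S S2) S0
      = S0.filter (fun x => rest.all (fun s => PySem.Set.contains s x)) := by
  induction rest generalizing S0 with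
  | nil => simp
  | cons s rest ih =>
    simp only [List.foldl_cons, ih, List.all_cons]
    show (PySem.Set.inter S0 s).filter _ = _
    have hinter : PySem.Set.inter S0 s = S0.filter (fun x => PySem.Set.contains s x) := by
      simp [PySem.Set.inter]
    rw [hinter, List.filter_filter]
    apply List.filter_congr
    intro x _
    exact Bool.and_comm _ _

-- A's inline letter-set accumulation equals B's pass-1 helper
theorem pv_vals_letters (HP VP : List (List String)) (e : String × Int × Int) :
    (if e.1 == "H" && decide (e.2.1 < (HP.length : Int)) then PySem.List.pyGetD HP e.2.1 []
     else if e.1 == "V" && decide (e.2.1 < (VP.length : Int)) then PySem.List.pyGetD VP e.2.1 []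
     else []).foldl (fun (s : PySem.Set String) w2 =>
        PySem.Set.add s (pvCharAt w2 e.2.2)) PySem.Set.empty = pvLettersB HP VP e := by
  unfold pvLettersB
  rw [PySem.Set.ofList_eq_foldl, List.foldl_map]
  rfl

-- ===== VERDICT (by name: the statement is the Claim_ definition above) =====
theorem compute_cell_letter_options_spec : Claim_equal_compute_cell_letter_options := by
  intro b H W HR VR HP VP cm _dom _hpre
  unfold Spec_compute_cell_letter_options
  unfold compute_cell_letter_options compute_cell_letter_options_alt
  dsimp only
  congr 1
  congr 1
  refine PySem.List.foldl_congr_mem _ _ _ _ ?_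
  intro acc i hi
  dsimp only
  by_cases hhash : (PySem.List.pyGetD b i "" == "#") = true
  · simp only [hhash, if_true]
  · simp only [hhash, Bool.not_eq_true] at *
    cases hget : PySem.Dict.get? (PySem.Dict.mk (cm.map (fun e => ((e.1, e.2.1), e.2.2))))
        (PySem.Int.floordiv i W, PySem.Int.mod i W) with
    | none => simp
    | some slots =>
      simp only [Bool.false_eq_true, if_false]
      by_cases hdash : (PySem.List.pyGetD b i "" == "-") = true
      · -- '-' cell: both compute slots.map letters, then intersect
        simp only [hdash, Bool.true_or, Bool.not_true, if_false, Bool.false_eq_true]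
        have hcov := pv_table_covered b W HP VP
          (PySem.Dict.mk (cm.map (fun e => ((e.1, e.2.1), e.2.2))))
          (PySem.List.pyRange 0 (H * W) 1) i hi (by simpa using hdash)
        have hgd : PySem.Dict.getD (PySem.Dict.mk (cm.map (fun e => ((e.1, e.2.1), e.2.2))))
            (PySem.Int.floordiv i W, PySem.Int.mod i W) [] = slots := by
          simp [PySem.Dict.getD, hget]
        rw [hgd] at hcov
        have hsets : slots.map (fun e => (PySem.Dict.get?
            ((PySem.List.pyRange 0 (H * W) 1).foldl (fun tb i =>
              if PySem.List.pyGetD b i "" == "-" then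
                (PySem.Dict.getD (PySem.Dict.mk (cm.map (fun e => ((e.1, e.2.1), e.2.2))))
                  (PySem.Int.floordiv i W, PySem.Int.mod i W) []).foldl
                  (fun tb e => if PySem.Dict.contains tb e then tb
                    else PySem.Dict.insert tb e (pvLettersB HP VP e)) tb
              else tb) PySem.Dict.empty) e).getD [])
            = slots.map (fun e => pvLettersB HP VP e) := by
          apply List.map_congr_left
          intro e he
          rw [hcov e he]
          rfl
        simp only [pv_vals_letters]
        rw [PySem.List.foldl_append_singleton_eq_map (fun e => pvLettersB HP VP e) slots [],
          hsets]
        simp only [List.nil_append]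
        cases slots.map (fun e => pvLettersB HP VP e) with
        | nil => rfl
        | cons S0 rest =>
          dsimp only
          rw [pv_inter_filter]
      · -- prefilled cell
        have hd : (PySem.List.pyGetD b i "" == "-") = false := by simpa using hdash
        simp only [hd, Bool.or_self, Bool.not_false, if_true]
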